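-- pv_equiv track=rewrite | github.com/LordMathis/pv248-python | 07-exercise/music.py | filter_cluster
-- ===== SOURCE A (Python) =====
-- def filter_cluster(amps, cluster_start, cluster_end):
--     if cluster_end - cluster_start == 1:
--         return cluster_start
--
--     cluster_max = cluster_start
--     cluster_center = cluster_start + ((cluster_end - cluster_start) // 2)
--     center_dist = abs(cluster_max - cluster_center)
--
--     for i in range(cluster_start+1, cluster_end):
--         if amps[i] > amps[cluster_max]:
--             cluster_max = i
--             center_dist = abs(cluster_max - cluster_center)
--         elif amps[i] == amps[cluster_max]:
--             if abs(i - cluster_center) < center_dist: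
--                 cluster_max = i
--                 center_dist = abs(cluster_max - cluster_center)
--
--     return cluster_max
-- ===== SOURCE B (Python) =====
-- def filter_cluster(amps, cluster_start, cluster_end):
--     if cluster_end - cluster_start <= 1:
--         return cluster_start
--     # pass 1: the maximum amplitude over the cluster
--     max_amp = max(amps[i] for i in range(cluster_start, cluster_end))
--     # pass 2: among indices attaining max_amp, pick the one closest to the
--     # cluster center; the earliest wins ties (strict improvement test)
--     cluster_center = cluster_start + (cluster_end - cluster_start) // 2
--     best = None
--     best_dist = 0
--     for i in range(cluster_start, cluster_end):
--         if amps[i] == max_amp: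
--             d = abs(i - cluster_center)
--             if best is None or d < best_dist:
--                 best = i
--                 best_dist = d
--     return best
-- ===== Notes on version B (the rewrite author's own statement) =====
-- stated objective: alternative
-- what changed: A's single stateful scan carrying a running best index and a cached center distance is replaced by two separate passes: first compute the maximum amplitude over the cluster, then select the earliest index attaining it that is closest to the cluster center.
import Mathlib
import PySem

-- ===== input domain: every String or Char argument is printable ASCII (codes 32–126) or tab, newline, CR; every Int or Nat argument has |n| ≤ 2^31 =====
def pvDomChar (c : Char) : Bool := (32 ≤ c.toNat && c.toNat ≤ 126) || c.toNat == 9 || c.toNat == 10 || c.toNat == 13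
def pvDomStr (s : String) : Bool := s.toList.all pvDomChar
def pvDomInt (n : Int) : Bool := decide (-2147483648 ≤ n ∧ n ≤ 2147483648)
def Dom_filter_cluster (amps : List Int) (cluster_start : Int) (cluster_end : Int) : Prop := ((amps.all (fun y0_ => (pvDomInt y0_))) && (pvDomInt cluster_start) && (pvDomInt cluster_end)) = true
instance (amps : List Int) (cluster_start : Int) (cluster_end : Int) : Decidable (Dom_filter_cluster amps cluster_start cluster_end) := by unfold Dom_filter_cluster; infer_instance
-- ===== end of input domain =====

-- B replaces A's single stateful scan (running best index + cached center distance)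
-- by two passes — first the maximum amplitude, then the closest-to-center index among
-- its occurrences — objective: alternative decomposition, same O(n) cost.

-- ===== PORT A =====
def filter_cluster (amps : List Int) (cluster_start : Int) (cluster_end : Int) : Int :=
  if cluster_end - cluster_start == 1 then cluster_start
  else
    let cluster_center := cluster_start + PySem.Int.floordiv (cluster_end - cluster_start) 2
    ((PySem.List.pyRange (cluster_start + 1) cluster_end 1).foldl
      (fun (p : Int × Int) i =>
        if PySem.List.pyGetD amps i 0 > PySem.List.pyGetD amps p.1 0 then
          (i, |i - cluster_center|)
        else if PySem.List.pyGetD amps i 0 = PySem.List.pyGetD amps p.1 0 then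
          (if |i - cluster_center| < p.2 then (i, |i - cluster_center|) else p)
        else p)
      (cluster_start, |cluster_start - cluster_center|)).1

-- ===== PORT B =====
def filter_cluster_alt (amps : List Int) (cluster_start : Int) (cluster_end : Int) : Int :=
  if cluster_end - cluster_start ≤ 1 then cluster_start
  else
    let idxs := PySem.List.pyRange cluster_start cluster_end 1
    -- pass 1: max(amps[i] for i in range(cluster_start, cluster_end)); the range is
    -- nonempty here, so max? is some — the none arm only makes the port total
    match PySem.List.max? (idxs.map fun i => PySem.List.pyGetD amps i 0) (fun y => y) with
    | none => cluster_start
    | some max_amp =>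
      let cluster_center := cluster_start + PySem.Int.floordiv (cluster_end - cluster_start) 2
      -- pass 2: earliest index with amps[i] == max_amp minimising |i - center|
      let best := idxs.foldl
        (fun (b : Option (Int × Int)) i =>
          if PySem.List.pyGetD amps i 0 = max_amp then
            match b with
            | none => some (i, |i - cluster_center|)
            | some p => if |i - cluster_center| < p.2 then some (i, |i - cluster_center|) else some p
          else b) none
      match best with
      | some p => p.1
      | none => cluster_start  -- unreachable: max_amp is attained in the range

-- ===== PRECONDITION & SPEC =====
-- Pre_ excludes exactly the inputs on which Python A raises IndexError: a cluster of
-- two or more indices reaching outside the valid (negative-wrapping) index range of amps.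
def Pre_filter_cluster (amps : List Int) (cluster_start : Int) (cluster_end : Int) : Prop :=
  cluster_end - cluster_start ≤ 1 ∨
    (-(amps.length : Int) ≤ cluster_start ∧ cluster_end ≤ (amps.length : Int))
instance (amps : List Int) (cluster_start : Int) (cluster_end : Int) : Decidable (Pre_filter_cluster amps cluster_start cluster_end) := by unfold Pre_filter_cluster; infer_instance

def pvWitness_filter_cluster : List Int × Int × Int := ([2, 5, 5, 1], 0, 4)

def Spec_filter_cluster (amps : List Int) (cluster_start : Int) (cluster_end : Int) (out : Int) : Prop := out = filter_cluster_alt amps cluster_start cluster_end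
instance (amps : List Int) (cluster_start : Int) (cluster_end : Int) (out : Int) : Decidable (Spec_filter_cluster amps cluster_start cluster_end out) := by unfold Spec_filter_cluster; infer_instance

-- ===== CLAIM (what is proved, stated in full; the proofs are below) =====
def Claim_equal_filter_cluster : Prop := ∀ (amps : List Int) (cluster_start : Int) (cluster_end : Int), Dom_filter_cluster amps cluster_start cluster_end → Pre_filter_cluster amps cluster_start cluster_end → Spec_filter_cluster amps cluster_start cluster_end (filter_cluster amps cluster_start cluster_end)

-- ===== LEMMAS AND PROOFS =====

-- A's comparison step, on the index alone
def pvCmp (f : Int → Int) (c : Int) (a i : Int) : Int :=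
  if f i > f a then i
  else if f i = f a then (if |i - c| < |a - c| then i else a)
  else a

-- B's pass-2 step
def pvG (f : Int → Int) (c m : Int) (b : Option (Int × Int)) (i : Int) : Option (Int × Int) :=
  if f i = m then
    match b with
    | none => some (i, |i - c|)
    | some p => if |i - c| < p.2 then some (i, |i - c|) else some p
  else b

lemma pvF_cmp (f : Int → Int) (c a i : Int) : f (pvCmp f c a i) = max (f a) (f i) := by
  unfold pvCmp; split_ifs <;> omega

-- A's fold carries the invariant snd = |fst - c|
lemma pvFoldA (f : Int → Int) (c : Int) (L : List Int) : ∀ a : Int,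
    (L.foldl (fun (p : Int × Int) i =>
        if f i > f p.1 then (i, |i - c|)
        else if f i = f p.1 then (if |i - c| < p.2 then (i, |i - c|) else p)
        else p) (a, |a - c|))
      = (L.foldl (pvCmp f c) a, |L.foldl (pvCmp f c) a - c|) := by
  induction L with
  | nil => intro a; simp
  | cons x L ih =>
    intro a
    simp only [List.foldl_cons]
    have hstep : (if f x > f a then (x, |x - c|)
        else if f x = f a then (if |x - c| < |a - c| then (x, |x - c|) else (a, |a - c|))
        else (a, |a - c|)) = (pvCmp f c a x, |pvCmp f c a x - c|) := by
      unfold pvCmp; split_ifs <;> rfl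
    rw [hstep, ih]

lemma pvStep (f : Int → Int) (c m a x : Int) (hfa : f a ≤ m) (hfx : f x ≤ m) :
    pvG f c m (pvG f c m none a) x = pvG f c m none (pvCmp f c a x) := by
  unfold pvG pvCmp
  by_cases h1 : f x > f a
  · simp only [if_pos h1]
    by_cases ha : f a = m
    · omega
    · simp [ha]
  · simp only [if_neg h1]
    by_cases h2 : f x = f a
    · by_cases ha : f a = m
      · by_cases h3 : |x - c| < |a - c| <;> simp [h2, ha, h3]
      · by_cases h3 : |x - c| < |a - c| <;> simp [h2, ha, h3]
    · have hx : ¬ f x = m ∨ f a = m := by omega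
      by_cases ha : f a = m
      · simp only [if_neg h2, if_pos ha]
        have : ¬ f x = m := by omega
        simp [this]
      · have : ¬ f x = m := by omega
        simp [h2, ha, this]

-- one-pass select = two-pass (max, then closest-to-center among maxima)
lemma pvMain (f : Int → Int) (c : Int) (L : List Int) : ∀ a : Int,
    L.foldl (pvG f c (L.foldl (fun acc i => max acc (f i)) (f a)))
        (pvG f c (L.foldl (fun acc i => max acc (f i)) (f a)) none a)
      = some (L.foldl (pvCmp f c) a, |L.foldl (pvCmp f c) a - c|) := by
  induction L with
  | nil => intro a; simp [pvG]
  | cons x L ih =>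
    intro a
    have hm : (x :: L).foldl (fun acc i => max acc (f i)) (f a)
        = L.foldl (fun acc i => max acc (f i)) (f (pvCmp f c a x)) := by
      simp [List.foldl_cons, pvF_cmp]
    have hle := PySem.List.le_foldl_max_int L f (max (f a) (f x))
    have hfa : f a ≤ L.foldl (fun acc i => max acc (f i)) (f (pvCmp f c a x)) := by
      rw [pvF_cmp f c a x]; omega
    have hfx : f x ≤ L.foldl (fun acc i => max acc (f i)) (f (pvCmp f c a x)) := by
      rw [pvF_cmp f c a x]; omega
    simp only [List.foldl_cons, hm]
    rw [pvStep f c _ a x hfa hfx]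
    exact ih (pvCmp f c a x)

-- ===== VERDICT (by name: the statement is the Claim_ definition above) =====
theorem filter_cluster_spec : Claim_equal_filter_cluster := by
  intro amps s e _ _
  unfold Spec_filter_cluster filter_cluster filter_cluster_alt
  set f : Int → Int := fun i => PySem.List.pyGetD amps i 0 with hf
  by_cases hle : e - s ≤ 1
  · -- degenerate: both return cluster_start
    rw [if_pos hle]
    by_cases h1 : e - s = 1
    · simp [h1]
    · have : (e - s == 1) = false := by simp; omega
      rw [this]
      simp only [Bool.false_eq_true, if_false]
      have hnil : PySem.List.pyRange (s + 1) e 1 = [] :=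
        PySem.List.pyRange_one_eq_nil (by omega)
      rw [hnil]; rfl
  · rw [if_neg hle]
    have h1 : (e - s == 1) = false := by simp; omega
    rw [h1]
    simp only [Bool.false_eq_true, if_false]
    have hcons : PySem.List.pyRange s e 1 = s :: PySem.List.pyRange (s + 1) e 1 :=
      PySem.List.pyRange_one_cons (by omega)
    rw [hcons]
    set L := PySem.List.pyRange (s + 1) e 1 with hL
    set c := s + PySem.Int.floordiv (e - s) 2 with hc
    -- pass 1: max? of the mapped cons list is the running max
    rw [List.map_cons, PySem.List.max?_id_cons]
    have hmax : (L.map f).foldl max (f s) = L.foldl (fun acc i => max acc (f i)) (f s) := by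
      rw [List.foldl_map]
    -- A side
    have hA := pvFoldA f c L s
    -- B side
    have hB := pvMain f c L s
    simp only [List.foldl_cons]
    rw [hmax]
    show (L.foldl (fun (p : Int × Int) i =>
          if f i > f p.1 then (i, |i - c|)
          else if f i = f p.1 then (if |i - c| < p.2 then (i, |i - c|) else p)
          else p) (s, |s - c|)).1
        = _
    rw [hA]
    set M := L.foldl (fun acc i => max acc (f i)) (f s) with hM
    show L.foldl (pvCmp f c) s =
      (match L.foldl (pvG f c M) (pvG f c M none s) with
       | some p => p.1
       | none => s)
    rw [hB]
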